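-- pv_equiv track=rewrite | github.com/Vincent-Xiao/FlagOSTune | scripts/tools/flagtune_summary.py | reorder_columns
-- ===== SOURCE A (Python) =====
-- def normalize_pretune_token(name: str) -> str:
--     return (
--         name.replace("_pretune", "")
--         .replace("pretune_", "")
--         .replace("_flagtune", "")
--         .replace("flagtune_", "")
--     )
--
-- def is_tuning_variant(name: str) -> bool:
--     lower = name.lower()
--     return "pretune" in lower or "flagtune" in lower
--
-- def rename_header_labels(header: list[str]) -> list[str]:
--     return [h.replace("pretune", "flagtune") for h in header]
--
-- def reorder_columns(header: list[str], rows: list[list[str]]) -> tuple[list[str], list[list[str]]]: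
--     if not header:
--         return header, rows
--
--     scenario_col = "Scenario" if "Scenario" in header else header[0]
--
--     value_cols = [c for c in header if c != scenario_col and "/" not in c]
--     ratio_cols = [c for c in header if "/" in c]
--
--     def order_grouped(cols: list[str], key_fn):
--         if not cols:
--             return []
--         first_seen: dict[str, int] = {}
--         for i, c in enumerate(cols):
--             k = key_fn(c)
--             if k not in first_seen:
--                 first_seen[k] = i
--
--         def sort_key(c: str):
--             k = key_fn(c)
--             is_pretune = 1 if is_tuning_variant(c) else 0
--             return (first_seen[k], is_pretune)
--
--         return sorted(cols, key=sort_key)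
--
--     ordered_values = order_grouped(value_cols, lambda c: normalize_pretune_token(c.lower()))
--
--     def ratio_group(col: str) -> str:
--         left, _, right = col.partition("/")
--         return normalize_pretune_token(left.lower()) + "/" + right.lower()
--
--     ordered_ratios = order_grouped(ratio_cols, ratio_group)
--
--     ordered_header = [scenario_col] + ordered_values + ordered_ratios
--     idx = [header.index(c) for c in ordered_header]
--
--     ordered_rows: list[list[str]] = []
--     for row in rows:
--         safe_row = row + [""] * (len(header) - len(row))
--         ordered_rows.append([safe_row[i] for i in idx])
--
--     return rename_header_labels(ordered_header), ordered_rows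
-- ===== SOURCE B (Python) =====
-- def normalize_pretune_token(name: str) -> str:
--     return (
--         name.replace("_pretune", "")
--         .replace("pretune_", "")
--         .replace("_flagtune", "")
--         .replace("flagtune_", "")
--     )
--
-- def is_tuning_variant(name: str) -> bool:
--     lower = name.lower()
--     return "pretune" in lower or "flagtune" in lower
--
-- def _value_key(c: str) -> str:
--     return normalize_pretune_token(c.lower())
--
-- def _ratio_key(c: str) -> str:
--     left, _, right = c.partition("/")
--     return normalize_pretune_token(left.lower()) + "/" + right.lower()
--
-- def reorder_columns(header: list[str], rows: list[list[str]]) -> tuple[list[str], list[list[str]]]: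
--     if not header:
--         return header, rows
--
--     scenario = header[0] if "Scenario" not in header else "Scenario"
--
--     # ONE pass over the header: classify each column and push it into one of two
--     # insertion-ordered bucket maps (no separate value/ratio lists, no sorting).
--     vbuckets: dict[str, list[str]] = {}
--     rbuckets: dict[str, list[str]] = {}
--     for c in header:
--         if "/" in c:
--             rbuckets.setdefault(_ratio_key(c), []).append(c)
--         elif c != scenario:
--             vbuckets.setdefault(_value_key(c), []).append(c)
--
--     def emit(buckets: dict[str, list[str]]) -> list[str]:
--         out: list[str] = []
--         for group in buckets.values():
--             out += [c for c in group if not is_tuning_variant(c)]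
--             out += [c for c in group if is_tuning_variant(c)]
--         return out
--
--     ordered_header = [scenario] + emit(vbuckets) + emit(rbuckets)
--
--     pos: dict[str, int] = {}
--     for i, c in enumerate(header):
--         pos.setdefault(c, i)
--     idx = [pos.get(c, 0) for c in ordered_header]
--
--     ordered_rows = [[row[i] if i < len(row) else "" for i in idx] for row in rows]
--     return [h.replace("pretune", "flagtune") for h in ordered_header], ordered_rows
-- ===== Notes on version B (the rewrite author's own statement) =====
-- stated objective: faster
-- what changed: Replaces A's staged pipeline (two header filters, then per-group first_seen dict + a keyed stable sort for each group, then repeated O(n) header.index scans) by a single classification pass over the header that pushes each column into one of two insertion-ordered bucket maps, emits buckets in first-appearance order with a stable non-variant/variant partition, and reprojects rows through one first-occurrence position dict with bounds-checked indexing instead of per-row padding.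
import Mathlib
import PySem

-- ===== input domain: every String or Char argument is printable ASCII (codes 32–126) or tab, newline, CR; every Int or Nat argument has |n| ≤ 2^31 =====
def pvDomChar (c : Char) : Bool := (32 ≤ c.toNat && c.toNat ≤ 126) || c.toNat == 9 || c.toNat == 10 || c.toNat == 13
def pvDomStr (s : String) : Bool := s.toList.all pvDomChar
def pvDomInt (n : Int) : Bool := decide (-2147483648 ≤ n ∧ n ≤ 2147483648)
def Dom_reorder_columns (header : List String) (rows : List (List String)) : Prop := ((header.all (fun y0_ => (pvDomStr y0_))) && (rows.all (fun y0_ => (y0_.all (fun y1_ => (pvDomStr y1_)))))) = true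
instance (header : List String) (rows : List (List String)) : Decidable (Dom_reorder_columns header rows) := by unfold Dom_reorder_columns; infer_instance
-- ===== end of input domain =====

-- B replaces A's staged pipeline (filters + per-group keyed stable sorts + repeated header.index
-- scans) by one classification pass into two insertion-ordered bucket maps and one position dict
-- (objective: faster, measured).

-- ===== shared helpers (identical helper functions in both Python sources) =====

def pvNormalize (name : String) : String :=
  PySem.Str.replace
    (PySem.Str.replace
      (PySem.Str.replace
        (PySem.Str.replace name "_pretune" "")
        "pretune_" "")
      "_flagtune" "")
    "flagtune_" ""

def pvIsVariant (name : String) : Bool :=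
  let lower := PySem.Str.lower name
  PySem.Str.isIn "pretune" lower || PySem.Str.isIn "flagtune" lower

-- col.partition("/") ported by hand via find + slice (exact: left of the first '/', rest after it;
-- no '/' gives (col, "", "")); only the two parts the Pythons use are computed
def pvRatioGroup (col : String) : String :=
  let i := PySem.Str.find col "/"
  let left := if i = -1 then col else PySem.Str.slice col none (some i)
  let right := if i = -1 then "" else PySem.Str.slice col (some (i + 1)) none
  pvNormalize (PySem.Str.lower left) ++ "/" ++ PySem.Str.lower right

def pvValueKey (c : String) : String := pvNormalize (PySem.Str.lower c)

-- ===== PORT A =====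

def pvRename (header : List String) : List String :=
  header.map (fun h => PySem.Str.replace h "pretune" "flagtune")

-- A's order_grouped: first_seen dict by enumerate, then sorted with the tuple key
-- (first_seen[k], is_pretune); first_seen[k] is always present, so getD 0 is exact there
def pvOrderGrouped (cols : List String) (keyFn : String → String) : List String :=
  if cols = [] then []
  else
    let firstSeen : PySem.Dict String Int :=
      (PySem.List.enumerate cols 0).foldl
        (fun d p => if d.contains (keyFn p.2) then d else d.insert (keyFn p.2) p.1)
        PySem.Dict.empty
    PySem.List.sorted2 cols
      (fun c => firstSeen.getD (keyFn c) 0)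
      (fun c => if pvIsVariant c then (1 : Int) else 0)

def reorder_columns (header : List String) (rows : List (List String)) : List String × List (List String) :=
  match header with
  | [] => (header, rows)
  | h0 :: _ =>
    let scenario := if header.contains "Scenario" then "Scenario" else h0
    let valueCols := header.filter (fun c => decide (c ≠ scenario) && !PySem.Str.isIn "/" c)
    let ratioCols := header.filter (fun c => PySem.Str.isIn "/" c)
    let orderedHeader :=
      scenario :: (pvOrderGrouped valueCols pvValueKey ++ pvOrderGrouped ratioCols pvRatioGroup)
    -- header.index(c): c is always a member, so the ValueError branch is unreachable
    let idx := orderedHeader.map (fun c => (PySem.List.index? header c).getD 0)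
    let orderedRows := rows.map (fun row =>
      let safe := row ++ List.replicate (header.length - row.length) ""
      idx.map (fun i => safe.getD i ""))
    (pvRename orderedHeader, orderedRows)

-- ===== PORT B =====

-- B's emit: buckets in insertion (= first-appearance) order, each bucket as its non-variants
-- followed by its variants
def pvEmit (buckets : PySem.Dict String (List String)) : List String :=
  buckets.values.foldl
    (fun out g => out ++ g.filter (fun c => !pvIsVariant c) ++ g.filter (fun c => pvIsVariant c))
    []

def reorder_columns_alt (header : List String) (rows : List (List String)) : List String × List (List String) :=
  if header.isEmpty then (header, rows)
  else
    let scenario := if !header.contains "Scenario" then header.headD "" else "Scenario"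
    -- ONE classification pass over the header filling the two bucket maps
    let bs :=
      header.foldl
        (fun (bs : PySem.Dict String (List String) × PySem.Dict String (List String)) c =>
          if PySem.Str.isIn "/" c then
            (bs.1, bs.2.modify (pvRatioGroup c) [] (fun g => g ++ [c]))
          else if c ≠ scenario then
            (bs.1.modify (pvValueKey c) [] (fun g => g ++ [c]), bs.2)
          else bs)
        (PySem.Dict.empty, PySem.Dict.empty)
    let orderedHeader := scenario :: (pvEmit bs.1 ++ pvEmit bs.2)
    let pos :=
      (PySem.List.enumerate header 0).foldl
        (fun d p => PySem.Dict.setdefault d p.2 p.1) (PySem.Dict.empty : PySem.Dict String Int)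
    let idx := orderedHeader.map (fun c => (pos.getD c 0).toNat)
    (orderedHeader.map (fun h => PySem.Str.replace h "pretune" "flagtune"),
      rows.map (fun row => idx.map (fun i => if i < row.length then row.getD i "" else "")))

-- ===== PRECONDITION & SPEC =====
def Spec_reorder_columns (header : List String) (rows : List (List String)) (out : List String × List (List String)) : Prop := out = reorder_columns_alt header rows
instance (header : List String) (rows : List (List String)) (out : List String × List (List String)) : Decidable (Spec_reorder_columns header rows out) := by unfold Spec_reorder_columns; infer_instance

-- ===== CLAIM (what is proved, stated in full; the proofs are below) =====
def Claim_equal_reorder_columns : Prop := ∀ (header : List String) (rows : List (List String)), Dom_reorder_columns header rows → Spec_reorder_columns header rows (reorder_columns header rows)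


-- ===== LEMMAS AND PROOFS =====

-- insertBy equations
theorem pv_insertBy_nil {a : Type} (b : a → a → Bool) (x : a) :
    PySem.List.insertBy b x [] = [x] := rfl

theorem pv_insertBy_cons {a : Type} (b : a → a → Bool) (x y : a) (l : List a) :
    PySem.List.insertBy b x (y :: l) =
      if b x y then x :: y :: l else y :: PySem.List.insertBy b x l := rfl

-- one step of Python's stable insertion sort, seen through a key-value filter
theorem pv_filter_insertBy {a : Type} (key : a → Int) (x : a) (ys : List a)
    (hys : ys.Pairwise (fun p q => key p ≤ key q)) (v : Int) :
    (PySem.List.insertBy (fun p q => decide (key p < key q)) x ys).filter (fun c => key c == v)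
      = ys.filter (fun c => key c == v) ++ if key x == v then [x] else [] := by
  induction ys with
  | nil => simp [pv_insertBy_nil, List.filter_cons]
  | cons y t ih =>
    rw [List.pairwise_cons] at hys
    obtain ⟨hy, ht⟩ := hys
    rw [pv_insertBy_cons]
    by_cases h : key x < key y
    · simp only [h, if_pos, decide_true]
      rw [List.filter_cons]
      by_cases hv : key x == v
      · have hnil : (y :: t).filter (fun c => key c == v) = [] := by
          rw [List.filter_eq_nil_iff]
          intro z hz
          have : key y ≤ key z := by
            rcases List.mem_cons.mp hz with rfl | hz'
            · exact le_refl _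
            · exact hy z hz'
          simp only [beq_iff_eq] at hv ⊢
          omega
        simp [hv, hnil]
      · simp [hv]
    · simp only [h, if_neg, decide_false, Bool.false_eq_true, not_false_eq_true]
      rw [List.filter_cons, List.filter_cons, ih ht]
      by_cases hv : key y == v <;> simp [hv]

theorem pv_sorted_append_singleton {a : Type} (key : a → Int) (l : List a) (x : a) :
    PySem.List.sorted (l ++ [x]) key =
      PySem.List.insertBy (fun p q => decide (key p < key q)) x (PySem.List.sorted l key) := by
  simp [PySem.List.sorted, List.foldl_append]

-- STABILITY of Python's sort: it permutes nothing within one key value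
theorem pv_sorted_filter {a : Type} (key : a → Int) (l : List a) (v : Int) :
    (PySem.List.sorted l key).filter (fun c => key c == v) = l.filter (fun c => key c == v) := by
  induction l using List.reverseRecOn with
  | nil => rfl
  | append_singleton l x ih =>
    rw [pv_sorted_append_singleton,
      pv_filter_insertBy key x _ (PySem.List.sorted_pairwise l key) v, ih,
      List.filter_append]
    by_cases hv : key x == v <;> simp [hv]

-- a sorted(key=(k1,k2)) with a 0/1 second component is sorted(key=2*k1+k2)
theorem pv_sorted2_eq_sorted {a : Type} (xs : List a) (k1 k2 : a → Int)
    (h : ∀ c, k2 c = 0 ∨ k2 c = 1) :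
    PySem.List.sorted2 xs k1 k2 = PySem.List.sorted xs (fun c => 2 * k1 c + k2 c) := by
  simp only [PySem.List.sorted2, PySem.List.sorted, if_neg (by decide : ¬(false = true))]
  have : (fun p q => decide (k1 p < k1 q) || (!decide (k1 q < k1 p) && decide (k2 p < k2 q)))
      = fun p q => decide (2 * k1 p + k2 p < 2 * k1 q + k2 q) := by
    funext p q
    rcases h p with hp | hp <;> rcases h q with hq | hq <;>
      by_cases h1 : k1 p < k1 q <;> by_cases h2 : k1 q < k1 p <;>
        simp [hp, hq, h1, h2] <;> omega
  rw [this]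

-- UNIQUENESS: a key-nondecreasing list is determined by its per-key-value filters
theorem pv_stable_unique {a : Type} (key : a → Int) :
    ∀ (l₁ l₂ : List a), l₁.Pairwise (fun p q => key p ≤ key q) →
      l₂.Pairwise (fun p q => key p ≤ key q) →
      (∀ v : Int, l₁.filter (fun c => key c == v) = l₂.filter (fun c => key c == v)) →
      l₁ = l₂ := by
  intro l₁
  induction l₁ with
  | nil =>
    intro l₂ _ _ hf
    cases l₂ with
    | nil => rfl
    | cons b t₂ =>
      have := hf (key b)
      simp at this
  | cons a t₁ ih =>
    intro l₂ h₁ h₂ hf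
    cases l₂ with
    | nil =>
      have := hf (key a)
      simp at this
    | cons b t₂ =>
      rw [List.pairwise_cons] at h₁ h₂
      obtain ⟨ha, ht₁⟩ := h₁
      obtain ⟨hb, ht₂⟩ := h₂
      -- each head's key occurs in the other list and heads carry the minimal key, so they agree
      have h1 := hf (key a)
      have h2 := hf (key b)
      rw [List.filter_cons, List.filter_cons,
        if_pos (by simp : (key a == key a) = true)] at h1
      rw [List.filter_cons, List.filter_cons,
        if_pos (by simp : (key b == key b) = true)] at h2
      have hba : key b ≤ key a := by
        by_cases e1 : key b = key a
        · omega
        · rw [if_neg (by simpa using e1)] at h1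
          have hmem : a ∈ t₂.filter (fun c => key c == key a) := by
            rw [← h1]; exact List.mem_cons_self
          exact hb a (List.mem_filter.mp hmem).1
      have hab' : key a ≤ key b := by
        by_cases e2 : key a = key b
        · omega
        · rw [if_neg (by simpa using e2)] at h2
          have hmem : b ∈ t₁.filter (fun c => key c == key b) := by
            rw [h2]; exact List.mem_cons_self
          exact ha b (List.mem_filter.mp hmem).1
      have hab : key a = key b := le_antisymm hab' hba
      have hfa := hf (key a)
      rw [List.filter_cons, List.filter_cons, if_pos (by simp), if_pos (by simp [hab])] at hfa
      injection hfa with hhead htf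
      subst hhead
      congr 1
      apply ih t₂ ht₁ ht₂
      intro v
      by_cases hv : key a = v
      · subst hv; exact htf
      · have h3 := hf v
        rw [List.filter_cons, List.filter_cons, if_neg (by simpa using hv),
          if_neg (by simpa using hv)] at h3
        exact h3

theorem pv_get?_none_of_not_contains {k v : Type} [BEq k] (d : PySem.Dict k v)
    (g : k) (h : d.contains g = false) : d.get? g = none := by
  have := PySem.Dict.contains_eq_isSome_get? d g
  rw [h] at this
  exact Option.not_isSome_iff_eq_none.mp (by simp [← this])

theorem pv_idxOf?_of_mem {b : Type} [BEq b] [LawfulBEq b] (l : List b) (c : b) (h : c ∈ l) :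
    List.idxOf? c l = some (List.idxOf c l) := by
  induction l with
  | nil => simp at h
  | cons x t ih =>
    rw [List.idxOf?_cons, List.idxOf_cons]
    by_cases e : x = c
    · simp [e]
    · rcases List.mem_cons.mp h with rfl | h'
      · simp at e
      · simp [e, ih h', Bool.cond_eq_ite]

-- the first-seen fold (A's first_seen, B's pos) computes the first-occurrence index
theorem pv_fs_get (kf : String → String) :
    ∀ (cols : List String) (s : Int) (d : PySem.Dict String Int) (g : String),
      ((PySem.List.enumerate cols s).foldl
          (fun d p => if d.contains (kf p.2) then d else d.insert (kf p.2) p.1) d).get? g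
        = (d.get? g).or (Option.map (fun (k : Nat) => s + (k : Int)) ((cols.map kf).idxOf? g)) := by
  intro cols
  induction cols with
  | nil => intro s d g; simp [PySem.List.enumerate]
  | cons c cols ih =>
    intro s d g
    have henum : PySem.List.enumerate (c :: cols) s = (s, c) :: PySem.List.enumerate cols (s + 1) := by
      simp [PySem.List.enumerate]
    rw [henum, List.foldl_cons]
    simp only [List.map_cons, List.idxOf?_cons]
    by_cases hc : d.contains (kf c) = true
    · rw [if_pos hc, ih (s + 1) d g]
      by_cases hg : kf c = g
      · subst hg
        obtain ⟨v, hv⟩ := Option.isSome_iff_exists.mp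
          ((PySem.Dict.contains_eq_isSome_get? d (kf c)) ▸ hc)
        simp [hv]
      · rw [if_neg (by simpa using hg)]
        congr 1
        rw [Option.map_map]
        congr 1
        funext k
        simp only [Function.comp_apply]
        push_cast
        ring
    · rw [if_neg hc, ih (s + 1) (d.insert (kf c) s) g]
      by_cases hg : kf c = g
      · subst hg
        rw [PySem.Dict.get?_insert_self, pv_get?_none_of_not_contains d _ (by simpa using hc)]
        simp
      · rw [PySem.Dict.get?_insert_of_ne d s (Ne.symm hg), if_neg (by simpa using hg)]
        congr 1
        rw [Option.map_map]
        congr 1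
        funext k
        simp only [Function.comp_apply]
        push_cast
        ring

theorem pv_fs_getD_mem (kf : String → String) (cols : List String) (g : String)
    (hg : g ∈ cols.map kf) :
    ((PySem.List.enumerate cols 0).foldl
        (fun d p => if d.contains (kf p.2) then d else d.insert (kf p.2) p.1)
        PySem.Dict.empty).getD g 0 = ((cols.map kf).idxOf g : Int) := by
  unfold PySem.Dict.getD
  rw [pv_fs_get kf cols 0 PySem.Dict.empty g, pv_idxOf?_of_mem _ _ hg]
  simp [PySem.Dict.empty, PySem.Dict.get?]

-- B's pos dict agrees with A's header.index on every name
theorem pv_pos_eq_index (header : List String) (c : String) :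
    ((((PySem.List.enumerate header 0).foldl
        (fun d p => PySem.Dict.setdefault d p.2 p.1)
        (PySem.Dict.empty : PySem.Dict String Int)).getD c 0).toNat : Nat)
      = (PySem.List.index? header c).getD 0 := by
  have h1 : (PySem.List.enumerate header 0).foldl
        (fun d p => PySem.Dict.setdefault d p.2 p.1) (PySem.Dict.empty : PySem.Dict String Int)
      = (PySem.List.enumerate header 0).foldl
        (fun d p => if d.contains ((fun (s : String) => s) p.2) = true then d
          else d.insert ((fun (s : String) => s) p.2) p.1)
        (PySem.Dict.empty : PySem.Dict String Int) := by
    congr 1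
    funext d p
    by_cases h : d.contains p.2 = true
    · simp [h, PySem.Dict.setdefault]
    · simp [h, PySem.Dict.setdefault_of_not_contains (h := by simpa using h)]
  rw [h1]
  unfold PySem.Dict.getD
  rw [pv_fs_get (fun s => s) header 0 PySem.Dict.empty c]
  rw [PySem.List.index?_eq_idxOf?]
  have hmapid : header.map (fun s => s) = header := List.map_id' header
  rw [hmapid]
  by_cases hmem : c ∈ header
  · rw [pv_idxOf?_of_mem _ _ hmem]
    simp [PySem.Dict.empty, PySem.Dict.get?]
  · rw [List.idxOf?_eq_none_iff.mpr hmem]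
    simp [PySem.Dict.empty, PySem.Dict.get?]

-- B's one classification pass = the two per-kind bucket folds over A's filtered column lists
theorem pv_classify_split (scenario : String) :
    ∀ (l : List String) (dv dr : PySem.Dict String (List String)),
      l.foldl
        (fun (bs : PySem.Dict String (List String) × PySem.Dict String (List String)) c =>
          if PySem.Str.isIn "/" c then
            (bs.1, bs.2.modify (pvRatioGroup c) [] (fun g => g ++ [c]))
          else if c ≠ scenario then
            (bs.1.modify (pvValueKey c) [] (fun g => g ++ [c]), bs.2)
          else bs)
        (dv, dr)
      = ((l.filter (fun c => decide (c ≠ scenario) && !PySem.Str.isIn "/" c)).foldl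
            (fun d c => d.modify (pvValueKey c) [] (fun g => g ++ [c])) dv,
         (l.filter (fun c => PySem.Str.isIn "/" c)).foldl
            (fun d c => d.modify (pvRatioGroup c) [] (fun g => g ++ [c])) dr) := by
  intro l
  induction l with
  | nil => intro dv dr; rfl
  | cons c l ih =>
    intro dv dr
    by_cases hr : PySem.Str.isIn "/" c = true
    · simp only [List.foldl_cons, List.filter_cons, hr, Bool.not_true, Bool.and_false,
        Bool.false_eq_true, if_false]
      exact ih dv _
    · have hrf : PySem.Str.isIn "/" c = false := by simpa using hr
      by_cases hs : c ≠ scenario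
      · simp only [List.foldl_cons, List.filter_cons, hrf, Bool.false_eq_true, if_false,
          if_pos hs, decide_eq_true hs, Bool.not_false, Bool.and_true]
        exact ih _ dr
      · simp only [List.foldl_cons, List.filter_cons, hrf, Bool.false_eq_true, if_false,
          if_neg hs, decide_eq_false hs, Bool.false_and]
        exact ih dv dr

-- B's emit of the bucket fold, in closed form: buckets in first-appearance order of their key,
-- each a stable partition
theorem pv_bucket_eq_flatMap (cols : List String) (kf : String → String) :
    pvEmit
        (cols.foldl (fun d c => d.modify (kf c) [] (fun g => g ++ [c]))
          (PySem.Dict.empty : PySem.Dict String (List String))) =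
      (PySem.Set.ofList (cols.map kf)).flatMap
        (fun g => (cols.filter (fun c => kf c == g)).filter (fun c => !pvIsVariant c)
               ++ (cols.filter (fun c => kf c == g)).filter (fun c => pvIsVariant c)) := by
  simp only [pvEmit]
  set D := cols.foldl (fun d c => d.modify (kf c) [] (fun g => g ++ [c]))
    (PySem.Dict.empty : PySem.Dict String (List String)) with hD
  have hkeys : D.keys = PySem.Set.ofList (cols.map kf) := by
    rw [hD, PySem.Dict.keys_foldl_modify_key cols kf [] (fun _ x => fun g => g ++ [x])]
    rfl
  have hnodup : D.keys.Nodup := by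
    rw [hD]
    exact PySem.Dict.nodup_keys_foldl_modify_key cols kf [] (fun _ x => fun g => g ++ [x]) _
      (by simp [PySem.Dict.empty, PySem.Dict.keys])
  have hgetD : ∀ g, D.getD g [] = cols.filter (fun c => kf c == g) := by
    intro g
    have hfold : D = (cols.map (fun c => (kf c, c))).foldl
        (fun d p => d.modify p.1 [] (fun x => x ++ [p.2]))
        (PySem.Dict.empty : PySem.Dict String (List String)) := by
      rw [hD, List.foldl_map]
    rw [hfold, PySem.Dict.getD_foldl_modify_append]
    rw [List.filter_map]
    simp [Function.comp_def, List.map_map]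
  have hvalues : D.values = D.keys.map (fun g => D.getD g []) :=
    PySem.Dict.values_eq_map_keys D hnodup []
  have hassoc : (fun (out : List String) (g : List String) =>
        out ++ g.filter (fun c => !pvIsVariant c) ++ g.filter (fun c => pvIsVariant c))
      = fun out g => out ++ (g.filter (fun c => !pvIsVariant c) ++ g.filter (fun c => pvIsVariant c)) := by
    funext out g
    rw [List.append_assoc]
  rw [hassoc, PySem.List.foldl_append_eq_flatMap, hvalues, hkeys, List.flatMap_map]
  simp only [List.nil_append]
  congr 1
  funext g
  rw [hgetD g]

-- dedup lists its members in order of strictly increasing first occurrence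
theorem pv_ofList_pairwise_idxOf {b : Type} [BEq b] [LawfulBEq b] (xs : List b) :
    (PySem.Set.ofList xs).Pairwise (fun p q => xs.idxOf p < xs.idxOf q) := by
  induction xs using List.reverseRecOn with
  | nil => simp [PySem.Set.ofList]
  | append_singleton xs x ih =>
    have hof : PySem.Set.ofList (xs ++ [x]) = PySem.Set.add (PySem.Set.ofList xs) x := by
      simp [PySem.Set.ofList, List.foldl_append]
    rw [hof]
    unfold PySem.Set.add
    by_cases hx : x ∈ xs
    · rw [if_pos (PySem.Set.contains_iff _ _ |>.mpr ((PySem.Set.mem_ofList xs x).mpr hx))]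
      refine ih.imp_of_mem ?_
      intro p q hp hq hpq
      have hpm := (PySem.Set.mem_ofList xs p).mp hp
      have hqm := (PySem.Set.mem_ofList xs q).mp hq
      rw [List.idxOf_append, if_pos hpm, List.idxOf_append, if_pos hqm]
      exact hpq
    · rw [if_neg (by
        intro hcon
        exact hx ((PySem.Set.mem_ofList xs x).mp ((PySem.Set.contains_iff _ _).mp hcon)))]
      rw [List.pairwise_append]
      refine ⟨ih.imp_of_mem ?_, List.pairwise_singleton _ _, ?_⟩
      · intro p q hp hq hpq
        rw [List.idxOf_append, if_pos ((PySem.Set.mem_ofList xs p).mp hp),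
          List.idxOf_append, if_pos ((PySem.Set.mem_ofList xs q).mp hq)]
        exact hpq
      · intro p hp q hq
        rw [List.mem_singleton] at hq
        subst hq
        have hpm := (PySem.Set.mem_ofList xs p).mp hp
        rw [List.idxOf_append, if_pos hpm, List.idxOf_append, if_neg hx]
        have := List.idxOf_lt_length_of_mem hpm
        simp [List.idxOf_cons_self]
        omega

theorem pv_flatMap_pairwise {b g_ : Type} (G : List b) (F : b → List g_) (key : g_ → Int)
    (hin : ∀ g ∈ G, (F g).Pairwise (fun p q => key p ≤ key q))
    (hcross : G.Pairwise (fun g₁ g₂ => ∀ p ∈ F g₁, ∀ q ∈ F g₂, key p ≤ key q)) :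
    (G.flatMap F).Pairwise (fun p q => key p ≤ key q) := by
  induction G with
  | nil => simp
  | cons g G ih =>
    rw [List.flatMap_cons, List.pairwise_append]
    rw [List.pairwise_cons] at hcross
    refine ⟨hin g List.mem_cons_self, ih (fun g' hg' => hin g' (List.mem_cons_of_mem _ hg'))
      hcross.2, ?_⟩
    intro p hp q hq
    obtain ⟨g', hg', hq'⟩ := List.mem_flatMap.mp hq
    exact hcross.1 g' hg' p hp q hq' 

theorem pv_flatMap_single {b g_ : Type} (G : List b) (gv : b) (hnd : G.Nodup) (hgv : gv ∈ G)
    (P : b → List g_) (hP : ∀ g ∈ G, g ≠ gv → P g = []) : G.flatMap P = P gv := by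
  induction G with
  | nil => simp at hgv
  | cons g G ih =>
    rw [List.flatMap_cons]
    rw [List.nodup_cons] at hnd
    by_cases hg : g = gv
    · subst hg
      have : G.flatMap P = [] := List.flatMap_eq_nil_iff.mpr (fun g' hg' =>
        hP g' (List.mem_cons_of_mem _ hg') (fun h => hnd.1 (h ▸ hg')))
      rw [this, List.append_nil]
    · rw [hP g List.mem_cons_self hg, List.nil_append]
      exact ih hnd.2 (List.mem_cons.mp hgv |>.resolve_left (fun h => hg h.symm))
        (fun g' hg' hne => hP g' (List.mem_cons_of_mem _ hg') hne)

theorem pv_flatMap_congr {b g_ : Type} (G : List b) (F₁ F₂ : b → List g_)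
    (h : ∀ g ∈ G, F₁ g = F₂ g) : G.flatMap F₁ = G.flatMap F₂ := by
  induction G with
  | nil => rfl
  | cons g G ih =>
    rw [List.flatMap_cons, List.flatMap_cons, h g List.mem_cons_self,
      ih (fun g' hg' => h g' (List.mem_cons_of_mem _ hg'))]

theorem pv_append_filter_cases {a : Type} {l : List a} {A B C : a → Bool}
    (h : ((∀ c ∈ l, B c = false) ∧ (∀ c ∈ l, A c = C c))
       ∨ ((∀ c ∈ l, A c = false) ∧ (∀ c ∈ l, B c = C c))) :
    l.filter A ++ l.filter B = l.filter C := by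
  rcases h with ⟨hB, hAC⟩ | ⟨hA, hBC⟩
  · have hBnil : l.filter B = [] := List.filter_eq_nil_iff.mpr (fun c hc => by simp [hB c hc])
    rw [hBnil, List.append_nil, List.filter_congr hAC]
  · have hAnil : l.filter A = [] := List.filter_eq_nil_iff.mpr (fun c hc => by simp [hA c hc])
    rw [hAnil, List.nil_append, List.filter_congr hBC]

-- the combined integer key 2*first_occurrence + variant_bit, on members of cols
theorem pv_bucket_pairwise (cols : List String) (kf : String → String) (κ : String → Int)
    (hκ : ∀ c ∈ cols, κ c = 2 * (((cols.map kf).idxOf (kf c) : Nat) : Int)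
      + (if pvIsVariant c then 1 else 0)) :
    ((PySem.Set.ofList (cols.map kf)).flatMap
        (fun g => (cols.filter (fun c => kf c == g)).filter (fun c => !pvIsVariant c)
               ++ (cols.filter (fun c => kf c == g)).filter (fun c => pvIsVariant c))).Pairwise
      (fun p q => κ p ≤ κ q) := by
  have hmemF : ∀ g c, c ∈ (cols.filter (fun c => kf c == g)).filter (fun c => !pvIsVariant c)
      ++ (cols.filter (fun c => kf c == g)).filter (fun c => pvIsVariant c) →
      c ∈ cols ∧ kf c = g := by
    intro g c hc
    rcases List.mem_append.mp hc with h | h <;>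
      · have h1 := List.mem_filter.mp h
        have h2 := List.mem_filter.mp h1.1
        exact ⟨h2.1, by simpa using h2.2⟩
  apply pv_flatMap_pairwise
  · intro g hg
    rw [List.pairwise_append]
    refine ⟨List.pairwise_of_forall_mem_list ?_, List.pairwise_of_forall_mem_list ?_, ?_⟩
    · intro p hp q hq
      have hp1 := List.mem_filter.mp hp
      have hq1 := List.mem_filter.mp hq
      have hp2 := List.mem_filter.mp hp1.1
      have hq2 := List.mem_filter.mp hq1.1
      rw [hκ p hp2.1, hκ q hq2.1, (by simpa using hp2.2 : kf p = g),
        (by simpa using hq2.2 : kf q = g)]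
      rw [if_neg (by simpa using hp1.2 : ¬pvIsVariant p = true),
        if_neg (by simpa using hq1.2 : ¬pvIsVariant q = true)]
    · intro p hp q hq
      have hp1 := List.mem_filter.mp hp
      have hq1 := List.mem_filter.mp hq
      have hp2 := List.mem_filter.mp hp1.1
      have hq2 := List.mem_filter.mp hq1.1
      rw [hκ p hp2.1, hκ q hq2.1, (by simpa using hp2.2 : kf p = g),
        (by simpa using hq2.2 : kf q = g)]
      simp only [hp1.2, hq1.2, if_pos]
      omega
    · intro p hp q hq
      have hp1 := List.mem_filter.mp hp
      have hq1 := List.mem_filter.mp hq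
      have hp2 := List.mem_filter.mp hp1.1
      have hq2 := List.mem_filter.mp hq1.1
      rw [hκ p hp2.1, hκ q hq2.1, (by simpa using hp2.2 : kf p = g),
        (by simpa using hq2.2 : kf q = g)]
      rw [if_neg (by simpa using hp1.2 : ¬pvIsVariant p = true), if_pos hq1.2]
      omega
  · refine (pv_ofList_pairwise_idxOf (cols.map kf)).imp_of_mem ?_
    intro g₁ g₂ _ _ hlt p hp q hq
    obtain ⟨hpc, hpg⟩ := hmemF g₁ p hp
    obtain ⟨hqc, hqg⟩ := hmemF g₂ q hq
    rw [hκ p hpc, hκ q hqc, hpg, hqg]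
    by_cases h1 : pvIsVariant p <;> by_cases h2 : pvIsVariant q <;> simp [h1, h2] <;> omega

theorem pv_bucket_filter (cols : List String) (kf : String → String) (κ : String → Int)
    (hκ : ∀ c ∈ cols, κ c = 2 * (((cols.map kf).idxOf (kf c) : Nat) : Int)
      + (if pvIsVariant c then 1 else 0)) (v : Int) :
    ((PySem.Set.ofList (cols.map kf)).flatMap
        (fun g => (cols.filter (fun c => kf c == g)).filter (fun c => !pvIsVariant c)
               ++ (cols.filter (fun c => kf c == g)).filter (fun c => pvIsVariant c))).filter
      (fun c => κ c == v)
      = cols.filter (fun c => κ c == v) := by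
  rw [List.filter_flatMap]
  have hpergroup : ∀ g ∈ PySem.Set.ofList (cols.map kf),
      (((cols.filter (fun c => kf c == g)).filter (fun c => !pvIsVariant c)
        ++ (cols.filter (fun c => kf c == g)).filter (fun c => pvIsVariant c)).filter
          (fun c => κ c == v))
        = (cols.filter (fun c => κ c == v)).filter (fun c => kf c == g) := by
    intro g hg
    simp only [List.filter_append, List.filter_filter]
    set i : Int := (((cols.map kf).idxOf g : Nat) : Int) with hi
    apply pv_append_filter_cases
    by_cases hv0 : v = 2 * i
    · left
      constructor
      · intro c hc
        have hκc := hκ c hc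
        by_cases hcg : kf c = g
        · rw [hcg] at hκc
          by_cases hvar : pvIsVariant c <;> simp [hκc, hcg, hvar, hv0, ← hi]
        · have hf : (kf c == g) = false := by simpa using hcg
          simp [hf]
      · intro c hc
        have hκc := hκ c hc
        by_cases hcg : kf c = g
        · rw [hcg] at hκc
          by_cases hvar : pvIsVariant c <;> simp [hκc, hcg, hvar, hv0, ← hi]
        · have hf : (kf c == g) = false := by simpa using hcg
          simp [hf]
    · by_cases hv1 : v = 2 * i + 1
      · right
        constructor
        · intro c hc
          have hκc := hκ c hc
          by_cases hcg : kf c = g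
          · rw [hcg] at hκc
            by_cases hvar : pvIsVariant c <;> simp [hκc, hcg, hvar, hv1, ← hi]
          · have hf : (kf c == g) = false := by simpa using hcg
            simp [hf]
        · intro c hc
          have hκc := hκ c hc
          by_cases hcg : kf c = g
          · rw [hcg] at hκc
            by_cases hvar : pvIsVariant c <;> simp [hκc, hcg, hvar, hv1, ← hi]
          · have hf : (kf c == g) = false := by simpa using hcg
            simp [hf]
      · left
        constructor
        · intro c hc
          have hκc := hκ c hc
          by_cases hcg : kf c = g
          · rw [hcg] at hκc
            by_cases hvar : pvIsVariant c <;> simp [hκc, hcg, hvar, ← hi]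
            omega
          · have hf : (kf c == g) = false := by simpa using hcg
            simp [hf]
        · intro c hc
          have hκc := hκ c hc
          by_cases hcg : kf c = g
          · rw [hcg] at hκc
            by_cases hvar : pvIsVariant c <;> simp [hκc, hcg, hvar, ← hi]
            omega
          · have hf : (kf c == g) = false := by simpa using hcg
            simp [hf]
  -- reassemble: all survivors of the κ-filter live in one bucket
  by_cases hL : cols.filter (fun c => κ c == v) = []
  · rw [List.flatMap_eq_nil_iff.mpr (fun g hg => by rw [hpergroup g hg, hL, List.filter_nil]), hL]
  · obtain ⟨c₀, hc₀⟩ := List.exists_mem_of_ne_nil _ hL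
    have hc₀' := List.mem_filter.mp hc₀
    have hsame : ∀ c ∈ cols.filter (fun c => κ c == v), kf c = kf c₀ := by
      intro c hc
      have hc' := List.mem_filter.mp hc
      have h1 := hκ c hc'.1
      have h2 := hκ c₀ hc₀'.1
      have hv1 : κ c = v := by simpa using hc'.2
      have hv2 : κ c₀ = v := by simpa using hc₀'.2
      have hidx : (cols.map kf).idxOf (kf c) = (cols.map kf).idxOf (kf c₀) := by
        by_cases b1 : pvIsVariant c <;> by_cases b2 : pvIsVariant c₀ <;>
          simp [b1, b2] at h1 h2 <;> omega
      have hm1 : kf c ∈ cols.map kf := List.mem_map_of_mem hc'.1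
      have hm2 : kf c₀ ∈ cols.map kf := List.mem_map_of_mem hc₀'.1
      calc kf c = (cols.map kf)[(cols.map kf).idxOf (kf c)]'(List.idxOf_lt_length_of_mem hm1) :=
            (List.getElem_idxOf _).symm
        _ = (cols.map kf)[(cols.map kf).idxOf (kf c₀)]'(List.idxOf_lt_length_of_mem hm2) := by
            congr 1
        _ = kf c₀ := List.getElem_idxOf _
    have hstep : ∀ g ∈ PySem.Set.ofList (cols.map kf),
        ((cols.filter (fun c => kf c == g)).filter (fun c => !pvIsVariant c)
          ++ (cols.filter (fun c => kf c == g)).filter (fun c => pvIsVariant c)).filter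
            (fun c => κ c == v)
          = if g = kf c₀ then cols.filter (fun c => κ c == v) else [] := by
      intro g hg
      rw [hpergroup g hg]
      by_cases hgv : g = kf c₀
      · rw [if_pos hgv, List.filter_eq_self.mpr (fun c hc => by simp [hsame c hc, hgv])]
      · rw [if_neg hgv, List.filter_eq_nil_iff]
        intro c hc hcon
        exact hgv (by rw [← hsame c hc]; exact (beq_iff_eq.mp hcon).symm) |>.elim
    calc (PySem.Set.ofList (cols.map kf)).flatMap _
        = (PySem.Set.ofList (cols.map kf)).flatMap
            (fun g => if g = kf c₀ then cols.filter (fun c => κ c == v) else []) := by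
          exact pv_flatMap_congr _ _ _ hstep
      _ = cols.filter (fun c => κ c == v) := by
          rw [pv_flatMap_single _ (kf c₀) (PySem.Set.nodup_ofList _)
            ((PySem.Set.mem_ofList _ _).mpr (List.mem_map_of_mem hc₀'.1)) _
            (fun g _ hne => if_neg hne)]
          rw [if_pos rfl]

-- A's order_grouped = B's bucket-and-emit: the heart of the equivalence
theorem pv_order_eq_bucket (cols : List String) (kf : String → String) :
    pvOrderGrouped cols kf =
      pvEmit (cols.foldl (fun d c => d.modify (kf c) [] (fun g => g ++ [c]))
        (PySem.Dict.empty : PySem.Dict String (List String))) := by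
  by_cases hnil : cols = []
  · subst hnil; rfl
  · rw [pv_bucket_eq_flatMap]
    simp only [pvOrderGrouped, if_neg hnil]
    rw [pv_sorted2_eq_sorted _ _ _ (fun c => by by_cases h : pvIsVariant c <;> simp [h])]
    have hκ : ∀ c ∈ cols,
        (2 * ((PySem.List.enumerate cols 0).foldl
            (fun d p => if d.contains (kf p.2) then d else d.insert (kf p.2) p.1)
            PySem.Dict.empty).getD (kf c) 0 + (if pvIsVariant c then (1 : Int) else 0))
          = 2 * (((cols.map kf).idxOf (kf c) : Nat) : Int)
            + (if pvIsVariant c then 1 else 0) := by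
      intro c hc
      rw [pv_fs_getD_mem kf cols (kf c) (List.mem_map_of_mem hc)]
    apply pv_stable_unique _ _ _ (PySem.List.sorted_pairwise _ _)
      (pv_bucket_pairwise cols kf _ hκ)
    intro v
    rw [pv_sorted_filter]
    exact (pv_bucket_filter cols kf _ hκ v).symm

-- reprojecting from the padded row = bounds-checked indexing
theorem pv_safe_get (row : List String) (n i : Nat) :
    (row ++ List.replicate n "").getD i "" = if i < row.length then row.getD i "" else "" := by
  simp only [List.getD_eq_getElem?_getD]
  by_cases h : i < row.length
  · rw [List.getElem?_append_left h, if_pos h]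
  · rw [List.getElem?_append_right (by omega), if_neg h]
    by_cases h2 : i - row.length < n
    · simp [h2]
    · simp [h2]

theorem reorder_eq (header : List String) (rows : List (List String)) :
    reorder_columns header rows = reorder_columns_alt header rows := by
  cases header with
  | nil => rfl
  | cons h0 t =>
    have hscen : (if !(h0 :: t).contains "Scenario" then (h0 :: t).headD "" else "Scenario")
        = (if (h0 :: t).contains "Scenario" then "Scenario" else h0) := by
      cases hcon : (h0 :: t).contains "Scenario"
      · simp
      · simp
    simp only [reorder_columns, reorder_columns_alt, List.isEmpty_cons, Bool.false_eq_true,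
      if_false, hscen, pv_classify_split, pv_order_eq_bucket, pv_safe_get, ← pv_pos_eq_index,
      pvRename]

-- ===== VERDICT (by name: the statement is the Claim_ definition above) =====
theorem reorder_columns_spec : Claim_equal_reorder_columns := by
  intro header rows _
  unfold Spec_reorder_columns
  exact reorder_eq header rows
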